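-- pv_equiv track=rewrite | github.com/JendaPlhak/math_in_python | KvagrsWork/1_task/gcd.py | gcd_modulo
-- ===== SOURCE A (Python) =====
-- def gcd_modulo(a, b):
--
--     steps = 0
--     while a % b != 0:
--         tmp = a
--         a   = b
--         b   = tmp % b
--
--         steps +=1
--
--     return steps
-- ===== SOURCE B (Python) =====
-- def gcd_modulo(a, b):
--     if a % b == 0:
--         return 0
--     return 1 + gcd_modulo(b, a % b)
-- ===== Notes on version B (the rewrite author's own statement) =====
-- stated objective: simpler
-- what changed: Replaces the explicit swap-and-loop with a mutable step accumulator by a direct recursion on the Euclidean recurrence gcd(a,b)=gcd(b,a%b), threading the count through the return value (1 + recursive call).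
import Mathlib
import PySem

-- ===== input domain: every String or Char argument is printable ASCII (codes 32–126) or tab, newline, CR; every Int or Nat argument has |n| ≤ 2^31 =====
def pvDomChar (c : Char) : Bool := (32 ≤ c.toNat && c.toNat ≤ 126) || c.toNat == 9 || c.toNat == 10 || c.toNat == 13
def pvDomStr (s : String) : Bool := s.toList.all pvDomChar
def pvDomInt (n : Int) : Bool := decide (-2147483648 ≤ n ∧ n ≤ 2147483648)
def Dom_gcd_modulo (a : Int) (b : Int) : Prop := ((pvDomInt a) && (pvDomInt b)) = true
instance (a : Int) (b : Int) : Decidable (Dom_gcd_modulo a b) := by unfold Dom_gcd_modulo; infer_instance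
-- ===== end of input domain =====

-- ===== PORT A =====
-- B changes only the decomposition (recursion instead of the swap-and-loop); return values agree for all b ≠ 0.
-- Termination helper for both ports (cited in decreasing_by): |a % b| < |b| for b ≠ 0.
theorem pv_mod_natAbs_lt (a b : Int) (hb : b ≠ 0) : (PySem.Int.mod a b).natAbs < b.natAbs := by
  rcases lt_or_gt_of_ne hb with h | h
  · have := PySem.Int.mod_neg_bounds a h
    omega
  · have h1 := PySem.Int.mod_nonneg a h
    have h2 := PySem.Int.mod_lt a h
    omega

-- the while-loop of A, with state (a, b, steps); b = 0 raises ZeroDivisionError in Python (excluded by Pre_)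
def gcdLoopA (a b steps : Int) : Int :=
  if hb : b = 0 then steps
  else if PySem.Int.mod a b = 0 then steps
  else gcdLoopA b (PySem.Int.mod a b) (steps + 1)
termination_by b.natAbs
decreasing_by exact pv_mod_natAbs_lt a b hb

def gcd_modulo (a : Int) (b : Int) : Int := gcdLoopA a b 0

-- ===== PORT B =====
def gcd_modulo_alt (a : Int) (b : Int) : Int :=
  if hb : b = 0 then 0  -- Python raises ZeroDivisionError here (excluded by Pre_); guard only for totality
  else if PySem.Int.mod a b = 0 then 0
  else 1 + gcd_modulo_alt b (PySem.Int.mod a b)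
termination_by b.natAbs
decreasing_by exact pv_mod_natAbs_lt a b hb

-- ===== PRECONDITION & SPEC =====
-- Pre_ excludes exactly b = 0, where Python A raises ZeroDivisionError.
def Pre_gcd_modulo (a : Int) (b : Int) : Prop := b ≠ 0
instance (a : Int) (b : Int) : Decidable (Pre_gcd_modulo a b) := by unfold Pre_gcd_modulo; infer_instance
def pvWitness_gcd_modulo : Int × Int := (12, 8)
def Spec_gcd_modulo (a : Int) (b : Int) (out : Int) : Prop := out = gcd_modulo_alt a b
instance (a : Int) (b : Int) (out : Int) : Decidable (Spec_gcd_modulo a b out) := by unfold Spec_gcd_modulo; infer_instance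

-- ===== CLAIM (what is proved, stated in full; the proofs are below) =====
def Claim_equal_gcd_modulo : Prop := ∀ (a : Int) (b : Int), Dom_gcd_modulo a b → Pre_gcd_modulo a b → Spec_gcd_modulo a b (gcd_modulo a b)

-- ===== LEMMAS AND PROOFS =====
theorem gcdLoopA_eq (a b steps : Int) : gcdLoopA a b steps = steps + gcd_modulo_alt a b := by
  rw [gcdLoopA, gcd_modulo_alt]
  split_ifs with h1 h2
  · simp
  · simp
  · rw [gcdLoopA_eq b (PySem.Int.mod a b) (steps + 1)]
    ring
termination_by b.natAbs
decreasing_by exact pv_mod_natAbs_lt a b h1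

-- ===== VERDICT (by name: the statement is the Claim_ definition above) =====
theorem gcd_modulo_spec : Claim_equal_gcd_modulo := by
  intro a b _ _
  unfold Spec_gcd_modulo gcd_modulo
  rw [gcdLoopA_eq]
  ring
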